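-- pv_equiv track=rewrite | github.com/jedevc/fyp | vulnspec/interpret/utils.py | find_deepest
-- ===== SOURCE A (Python) =====
-- from typing import Collection, Iterable, List, Optional, Sequence, TypeVar
--
-- T = TypeVar("T")
--
-- def find_deepest(items: Collection[T], lists: Sequence[Sequence[T]]) -> Optional[T]:
--     if len(items) == 0:
--         return None
--
--     primary = lists[0]
--     for item in reversed(primary):
--         if item in items:
--             return item
--
--     raise AssertionError()
-- ===== SOURCE B (Python) =====
-- def find_deepest(items, lists):
--     if len(items) == 0:
--         return None
--     last_pos = {}
--     for i, x in enumerate(lists[0]):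
--         last_pos[x] = i
--     best_i = -1
--     best_x = None
--     for it in items:
--         i = last_pos.get(it, -1)
--         if i > best_i:
--             best_i, best_x = i, it
--     if best_i < 0:
--         raise AssertionError()
--     return best_x
-- ===== Notes on version B (the rewrite author's own statement) =====
-- stated objective: alternative
-- what changed: Instead of scanning the primary list in reverse testing membership in items, B builds a dict mapping each element of lists[0] to its last index in one pass and then iterates over items taking the item with the maximum such index, so no membership scan over items remains.
-- outside the precondition, e.g. on find_deepest([1], []): A raises IndexError, B raises IndexError; on find_deepest([5], [[1, 2]]): A raises AssertionError, B raises AssertionError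
import Mathlib
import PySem

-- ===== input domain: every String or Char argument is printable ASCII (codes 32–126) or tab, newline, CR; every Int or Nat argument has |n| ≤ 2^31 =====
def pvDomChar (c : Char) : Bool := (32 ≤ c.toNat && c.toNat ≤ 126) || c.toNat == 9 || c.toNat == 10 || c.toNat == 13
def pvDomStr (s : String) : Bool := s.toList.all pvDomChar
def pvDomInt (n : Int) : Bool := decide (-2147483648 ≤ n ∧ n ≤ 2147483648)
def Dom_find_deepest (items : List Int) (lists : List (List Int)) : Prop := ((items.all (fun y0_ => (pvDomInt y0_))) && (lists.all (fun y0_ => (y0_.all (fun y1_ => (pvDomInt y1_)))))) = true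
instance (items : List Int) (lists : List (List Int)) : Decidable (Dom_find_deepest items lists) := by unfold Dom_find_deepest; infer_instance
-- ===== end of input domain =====

-- B replaces A's reverse scan with membership tests by a last-index dict over lists[0] plus a max-index pass over items (objective: alternative).


-- ===== PORT A =====
-- for item in reversed(primary): if item in items: return item
def pvRevScan (items : List Int) : List Int → Option Int
  | [] => none                      -- loop ends: AssertionError (outside Pre_, port returns none)
  | x :: rest => if items.contains x then some x else pvRevScan items rest

def find_deepest (items : List Int) (lists : List (List Int)) : Option Int :=
  if items.length = 0 then none
  else
    match PySem.List.pyGet? lists 0 with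
    | none => none                  -- IndexError on lists[0] (outside Pre_)
    | some primary => pvRevScan items primary.reverse

-- ===== PORT B =====
-- last_pos = {}; for i, x in enumerate(lists[0]): last_pos[x] = i
def pvLastPos (primary : List Int) : PySem.Dict Int Int :=
  (PySem.List.enumerate primary 0).foldl (fun d p => d.insert p.2 p.1) PySem.Dict.empty

-- i = last_pos.get(it, -1); if i > best_i: best_i, best_x = i, it
def pvBestStep (d : PySem.Dict Int Int) (st : Int × Option Int) (it : Int) : Int × Option Int :=
  if d.getD it (-1) > st.1 then (d.getD it (-1), some it) else st

def find_deepest_alt (items : List Int) (lists : List (List Int)) : Option Int :=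
  if items.length = 0 then none
  else
    match PySem.List.pyGet? lists 0 with
    | none => none                  -- IndexError on lists[0] (outside Pre_)
    | some primary =>
      let st := items.foldl (pvBestStep (pvLastPos primary)) (-1, none)
      if st.1 < 0 then none else st.2   -- best_i < 0: AssertionError (outside Pre_, port returns none)

-- ===== PRECONDITION & SPEC =====
-- Pre_ excludes exactly the inputs where the Python raises: IndexError (lists empty with items nonempty)
-- and AssertionError (no element of lists[0] is in items).
def Pre_find_deepest (items : List Int) (lists : List (List Int)) : Prop :=
  items = [] ∨ (lists ≠ [] ∧ (lists.headD []).any (fun x => items.contains x) = true)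
instance (items : List Int) (lists : List (List Int)) : Decidable (Pre_find_deepest items lists) := by unfold Pre_find_deepest; infer_instance
def pvWitness_find_deepest : List Int × List (List Int) := ([2, 5], [[1, 2, 3], [7]])
def Spec_find_deepest (items : List Int) (lists : List (List Int)) (out : Option Int) : Prop := out = find_deepest_alt items lists
instance (items : List Int) (lists : List (List Int)) (out : Option Int) : Decidable (Spec_find_deepest items lists out) := by unfold Spec_find_deepest; infer_instance

-- ===== CLAIM (what is proved, stated in full; the proofs are below) =====
def Claim_equal_find_deepest : Prop := ∀ (items : List Int) (lists : List (List Int)), Dom_find_deepest items lists → Pre_find_deepest items lists → Spec_find_deepest items lists (find_deepest items lists)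

-- ===== LEMMAS AND PROOFS =====

-- appending one element to primary overwrites its key in the last-index dict with the new (largest) index
theorem pvLastPos_append (l : List Int) (a y : Int) :
    (pvLastPos (l ++ [a])).getD y (-1) =
      if y = a then (l.length : Int) else (pvLastPos l).getD y (-1) := by
  unfold pvLastPos
  rw [PySem.List.enumerate_append, List.foldl_append]
  simp [PySem.List.enumerate, PySem.Dict.getD_insert]

-- every stored last index lies in [0, l.length); a missing key defaults to -1
theorem pvLastPos_bounds (l : List Int) (y : Int) :
    -1 ≤ (pvLastPos l).getD y (-1) ∧ (pvLastPos l).getD y (-1) < (l.length : Int) := by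
  induction l using List.reverseRecOn with
  | nil => simp [pvLastPos, PySem.List.enumerate, PySem.Dict.getD_empty]
  | append_singleton l a ih =>
    rw [pvLastPos_append]
    by_cases h : y = a
    · simp [h, List.length_append]
    · simp only [h, if_false]
      have := ih
      simp [List.length_append]
      omega

-- A's reverse-scan hit x is in items, is present in the dict, and its last index dominates
-- (strictly, except at x itself) the last index of every member of items
theorem pvKey (items l : List Int) (x : Int)
    (h : pvRevScan items l.reverse = some x) :
    x ∈ items ∧ 0 ≤ (pvLastPos l).getD x (-1) ∧
      (∀ it ∈ items, (pvLastPos l).getD it (-1) ≤ (pvLastPos l).getD x (-1)) ∧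
      (∀ it ∈ items, (pvLastPos l).getD it (-1) = (pvLastPos l).getD x (-1) → it = x) := by
  induction l using List.reverseRecOn with
  | nil => simp [pvRevScan] at h
  | append_singleton l a ih =>
    rw [List.reverse_append, List.reverse_singleton, List.singleton_append] at h
    simp only [pvRevScan] at h
    by_cases ha : a ∈ items
    · simp only [List.contains_eq_mem, ha, decide_true, if_true, Option.some.injEq] at h
      subst h
      have hx : (pvLastPos (l ++ [a])).getD a (-1) = (l.length : Int) := by
        rw [pvLastPos_append]; simp
      refine ⟨ha, by rw [hx]; positivity, ?_, ?_⟩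
      · intro it _
        rw [hx, pvLastPos_append]
        by_cases hit : it = a
        · simp [hit]
        · simpa [hit] using le_of_lt (pvLastPos_bounds l it).2
      · intro it _ heq
        rw [hx, pvLastPos_append] at heq
        by_cases hit : it = a
        · exact hit
        · simp only [hit, if_false] at heq
          exact absurd heq (ne_of_lt (pvLastPos_bounds l it).2)
    · simp only [List.contains_eq_mem, ha, decide_false, Bool.false_eq_true, if_false] at h
      obtain ⟨hx, hpos, hle, heq⟩ := ih h
      have lift : ∀ it ∈ items, (pvLastPos (l ++ [a])).getD it (-1) = (pvLastPos l).getD it (-1) := by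
        intro it hit
        rw [pvLastPos_append]
        have : it ≠ a := fun e => ha (e ▸ hit)
        simp [this]
      refine ⟨hx, by rw [lift x hx]; exact hpos, ?_, ?_⟩
      · intro it hit; rw [lift it hit, lift x hx]; exact hle it hit
      · intro it hit e; rw [lift it hit, lift x hx] at e; exact heq it hit e

-- the max-index fold over items ends at (i, some x) when x attains the maximum i uniquely
theorem pvFoldBest (d : PySem.Dict Int Int) (x : Int) (items : List Int)
    (H1 : ∀ it ∈ items, d.getD it (-1) ≤ d.getD x (-1))
    (H2 : ∀ it ∈ items, d.getD it (-1) = d.getD x (-1) → it = x) :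
    ∀ st : Int × Option Int, st.1 ≤ d.getD x (-1) →
      (st.1 = d.getD x (-1) → st.2 = some x) →
      (x ∈ items ∨ st.1 = d.getD x (-1)) →
      items.foldl (pvBestStep d) st = (d.getD x (-1), some x) := by
  induction items with
  | nil =>
    intro st _ h2 h3
    have he := h3.resolve_left (by simp)
    simp only [List.foldl_nil]
    exact Prod.ext (by simp [he]) (by simpa using h2 he)
  | cons it rest ih =>
    intro st h1 h2 h3
    simp only [List.foldl_cons]
    have H1' : ∀ j ∈ rest, d.getD j (-1) ≤ d.getD x (-1) := fun j hj => H1 j (by simp [hj])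
    have H2' : ∀ j ∈ rest, d.getD j (-1) = d.getD x (-1) → j = x := fun j hj => H2 j (by simp [hj])
    unfold pvBestStep
    by_cases hgt : d.getD it (-1) > st.1
    · rw [if_pos hgt]
      by_cases hx : it = x
      · subst hx
        exact ih H1' H2' _ le_rfl (fun _ => rfl) (Or.inr rfl)
      · have hlt : d.getD it (-1) < d.getD x (-1) :=
          lt_of_le_of_ne (H1 it (by simp)) (fun e => hx (H2 it (by simp) e))
        refine ih H1' H2' _ (le_of_lt hlt) (fun e => absurd e (ne_of_lt hlt)) ?_
        rcases h3 with hm | he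
        · rcases List.mem_cons.mp hm with e | hr
          · exact absurd e.symm hx
          · exact Or.inl hr
        · omega
    · rw [if_neg hgt]
      refine ih H1' H2' st h1 h2 ?_
      rcases h3 with hm | he
      · rcases List.mem_cons.mp hm with e | hr
        · subst e
          exact Or.inr (le_antisymm h1 (by omega))
        · exact Or.inl hr
      · exact Or.inr he

-- some element of l is in items → the reverse scan returns a hit
theorem pvRevScan_isSome (items l : List Int)
    (h : l.any (fun y => items.contains y) = true) : ∃ x, pvRevScan items l = some x := by
  induction l with
  | nil => simp at h
  | cons a rest ih =>
    simp only [pvRevScan]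
    by_cases ha : items.contains a = true
    · exact ⟨a, by simp only [if_pos ha]⟩
    · simp only [List.any_cons, ha, Bool.false_or] at h
      obtain ⟨x, hx⟩ := ih h
      exact ⟨x, by simp only [if_neg ha]; exact hx⟩

-- ===== VERDICT (by name: the statement is the Claim_ definition above) =====
theorem find_deepest_spec : Claim_equal_find_deepest := by
  intro items lists _ hpre
  unfold Spec_find_deepest find_deepest find_deepest_alt
  by_cases hn : items.length = 0
  · simp [hn]
  · rw [if_neg hn, if_neg hn]
    rcases hpre with he | ⟨hne, hany⟩
    · exact absurd (by simp [he]) hn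
    · obtain ⟨p, lists'⟩ := List.exists_cons_of_ne_nil hne
      obtain ⟨rest, rfl⟩ := lists'
      have hp : PySem.List.pyGet? (p :: rest) 0 = some p := by
        simp [PySem.List.pyGet?, PySem.List.pyIdx?]
      simp only [List.headD_cons] at hany
      have hany' : p.reverse.any (fun y => items.contains y) = true := by
        simpa using hany
      obtain ⟨x, hx⟩ := pvRevScan_isSome items p.reverse hany'
      obtain ⟨hmem, hpos, hle, heq⟩ := pvKey items p x hx
      simp only [hp, hx]
      rw [pvFoldBest (pvLastPos p) x items hle heq (-1, none) (by omega)
        (by intro e; simp at e; omega) (Or.inl hmem)]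
      rw [if_neg (by simp; omega)]
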